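-- pv_equiv track=rewrite | github.com/Z-MarkUs/Prompt-Refinement-for-AI-Coding-Assistance | AutoTest/leetcode_solutions/finetuned/1133.py | largestUniqueNumber
-- ===== SOURCE A (Python) =====
-- from typing import List
--
-- def largestUniqueNumber(nums: List[int]) -> int:
--     num_freq = {}
--     for num in nums:
--         if num in num_freq:
--             num_freq[num] += 1
--         else:
--             num_freq[num] = 1
--
--     unique_nums = [key for key, value in num_freq.items() if value == 1]
--
--     if not unique_nums:
--         return -1
--
--     return max(unique_nums)
-- ===== SOURCE B (Python) =====
-- def largestUniqueNumber(nums):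
--     s = sorted(nums, reverse=True)
--     prev = None
--     for i, x in enumerate(s):
--         nxt = s[i + 1] if i + 1 < len(s) else None
--         if prev != x and nxt != x:
--             return x
--         prev = x
--     return -1
-- ===== Notes on version B (the rewrite author's own statement) =====
-- stated objective: alternative
-- what changed: Replaces the dict frequency count plus max over singleton keys by sorting the list in descending order and returning the first element that differs from both neighbours (the largest run of length 1).
import Mathlib
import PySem

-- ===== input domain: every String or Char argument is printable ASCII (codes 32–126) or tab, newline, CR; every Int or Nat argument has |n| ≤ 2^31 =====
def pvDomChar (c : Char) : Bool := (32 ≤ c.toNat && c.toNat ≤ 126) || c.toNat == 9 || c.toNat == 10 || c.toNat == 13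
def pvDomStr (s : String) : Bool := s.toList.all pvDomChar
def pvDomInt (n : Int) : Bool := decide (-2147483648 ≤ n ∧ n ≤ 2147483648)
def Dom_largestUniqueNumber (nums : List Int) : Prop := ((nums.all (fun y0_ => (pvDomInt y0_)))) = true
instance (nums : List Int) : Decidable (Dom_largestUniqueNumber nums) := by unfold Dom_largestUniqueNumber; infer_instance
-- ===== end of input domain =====

-- B replaces A's dict frequency count + max over singleton keys with a descending sort
-- scanned for the first element differing from both neighbours (objective: alternative).

-- ===== PORT A =====
def largestUniqueNumber (nums : List Int) : Int :=
  let freq := nums.foldl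
    (fun d num => if d.contains num then d.insert num (d.getD num 0 + 1) else d.insert num 1)
    PySem.Dict.empty
  let unique_nums := (freq.items.filter (fun p => p.2 == (1 : Int))).map (·.1)
  if unique_nums.isEmpty then -1
  else (PySem.List.max? unique_nums (fun x => x)).getD (-1)

-- ===== PORT B =====
-- the for-loop over the descending-sorted list, carrying `prev`; `rest.head?` is the
-- guarded next-neighbour lookup `s[i+1] if i+1 < len(s) else None`
def scanAltB : Option Int → List Int → Int
  | _, [] => -1
  | prev, x :: rest =>
      if prev ≠ some x ∧ rest.head? ≠ some x then x
      else scanAltB (some x) rest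

def largestUniqueNumber_alt (nums : List Int) : Int :=
  scanAltB none (PySem.List.sorted nums (fun x => x) true)

-- ===== PRECONDITION & SPEC =====
def Spec_largestUniqueNumber (nums : List Int) (out : Int) : Prop := out = largestUniqueNumber_alt nums
instance (nums : List Int) (out : Int) : Decidable (Spec_largestUniqueNumber nums out) := by unfold Spec_largestUniqueNumber; infer_instance

-- ===== CLAIM (what is proved, stated in full; the proofs are below) =====
def Claim_equal_largestUniqueNumber : Prop := ∀ (nums : List Int), Dom_largestUniqueNumber nums → Spec_largestUniqueNumber nums (largestUniqueNumber nums)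

-- ===== LEMMAS AND PROOFS =====

/-- Common characterisation of the answer: -1 with no unique element, or the
largest element of `nums` whose count is 1. -/
def UniqSpec (nums : List Int) (r : Int) : Prop :=
  (r = -1 ∧ ∀ z ∈ nums, nums.count z ≠ 1) ∨
  (r ∈ nums ∧ nums.count r = 1 ∧ ∀ z ∈ nums, nums.count z = 1 → z ≤ r)

theorem uniqSpec_unique {nums : List Int} {r r' : Int}
    (h : UniqSpec nums r) (h' : UniqSpec nums r') : r = r' := by
  rcases h with ⟨hr, hno⟩ | ⟨hm, hc, hmax⟩
  · rcases h' with ⟨hr', _⟩ | ⟨hm', hc', _⟩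
    · omega
    · exact absurd hc' (hno _ hm')
  · rcases h' with ⟨_, hno'⟩ | ⟨hm', hc', hmax'⟩
    · exact absurd hc (hno' _ hm)
    · exact le_antisymm (hmax' _ hm hc) (hmax _ hm' hc')

-- A's counting step is exactly the Counter step.
theorem stepA_eq (d : PySem.Dict Int Int) (x : Int) :
    (if d.contains x then d.insert x (d.getD x 0 + 1) else d.insert x 1)
      = d.insert x (d.getD x 0 + 1) := by
  by_cases h : d.contains x
  · simp [h]
  · rw [if_neg h, PySem.Dict.getD_of_not_contains d 0 (by simpa using h)]; norm_num

theorem A_uniqSpec (nums : List Int) : UniqSpec nums (largestUniqueNumber nums) := by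
  have hfold : nums.foldl
      (fun d num => if d.contains num then d.insert num (d.getD num 0 + 1) else d.insert num 1)
      PySem.Dict.empty = PySem.Dict.counter nums := by
    rw [show (fun (d : PySem.Dict Int Int) (num : Int) =>
        if d.contains num then d.insert num (d.getD num 0 + 1) else d.insert num 1)
        = (fun d num => d.insert num (d.getD num 0 + 1)) from funext fun d => funext fun x => stepA_eq d x]
    exact PySem.Dict.foldl_insert_getD_add_one_eq_counter nums
  unfold largestUniqueNumber
  simp only [hfold, PySem.Dict.items_counter]
  set U := (((PySem.Set.ofList nums).map (fun k => (k, (nums.count k : Int)))).filter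
      (fun p => p.2 == (1 : Int))).map (·.1) with hU
  have hmemU : ∀ k, k ∈ U ↔ k ∈ nums ∧ nums.count k = 1 := by
    intro k
    simp only [hU, List.mem_map, List.mem_filter]
    constructor
    · rintro ⟨p, ⟨⟨j, hj, rfl⟩, hv⟩, rfl⟩
      simp only [beq_iff_eq] at hv
      exact ⟨(PySem.Set.mem_ofList nums j).mp hj, by exact_mod_cast hv⟩
    · rintro ⟨hk, hc⟩
      exact ⟨(k, (nums.count k : Int)),
        ⟨⟨k, (PySem.Set.mem_ofList nums k).mpr hk, rfl⟩, by simp [hc]⟩, rfl⟩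
  by_cases he : U.isEmpty
  · simp only [he, if_true]
    left
    refine ⟨rfl, fun z hz hc => ?_⟩
    have : z ∈ U := (hmemU z).mpr ⟨hz, hc⟩
    rw [List.isEmpty_iff] at he
    simp [he] at this
  · simp only [he]
    right
    obtain ⟨m, hm⟩ : ∃ m, PySem.List.max? U (fun x => x) = some m := by
      rcases h : PySem.List.max? U (fun x => x) with _ | m
      · rw [PySem.List.max?_eq_none_iff] at h
        simp [h] at he
      · exact ⟨m, rfl⟩
    rw [hm]
    have hmU := PySem.List.max?_mem hm
    have hmax := PySem.List.max?_isMax hm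
    obtain ⟨hmn, hmc⟩ := (hmemU m).mp hmU
    exact ⟨hmn, hmc, fun z hz hc => hmax z ((hmemU z).mpr ⟨hz, hc⟩)⟩

/-- Invariant for B's scan over a descending-sorted list. -/
theorem scanAltB_spec (l : List Int) (prev : Option Int)
    (hsort : l.Pairwise (fun a b => b ≤ a))
    (hprev : ∀ p, prev = some p → ∀ z ∈ l, z ≤ p) :
    (scanAltB prev l = -1 ∧ ∀ z ∈ l, ¬(l.count z = 1 ∧ prev ≠ some z)) ∨
    (scanAltB prev l ∈ l ∧ l.count (scanAltB prev l) = 1 ∧ prev ≠ some (scanAltB prev l) ∧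
      ∀ z ∈ l, l.count z = 1 → prev ≠ some z → z ≤ scanAltB prev l) := by
  induction l generalizing prev with
  | nil => exact Or.inl ⟨rfl, by simp⟩
  | cons x rest ih =>
    rw [List.pairwise_cons] at hsort
    obtain ⟨hle, hsrest⟩ := hsort
    by_cases hbr : prev ≠ some x ∧ rest.head? ≠ some x
    · -- return x
      have hstep : scanAltB prev (x :: rest) = x := by
        simp only [scanAltB]; exact if_pos hbr
      have hxrest : x ∉ rest := by
        intro hx
        rcases hrest : rest with _ | ⟨y, rs⟩
        · simp [hrest] at hx
        · subst hrest
          have hyx : y ≠ x := by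
            intro h; exact hbr.2 (by simp [h])
          rw [List.pairwise_cons] at hsrest
          rcases List.mem_cons.mp hx with h | h
          · exact hyx h.symm
          · have h1 : x ≤ y := hsrest.1 x h
            have h2 : y ≤ x := hle y List.mem_cons_self
            omega
      have hcount : (x :: rest).count x = 1 := by
        rw [List.count_cons_self, List.count_eq_zero.mpr hxrest]
      rw [hstep]
      right
      refine ⟨List.mem_cons_self, hcount, hbr.1, fun z hz _ _ => ?_⟩
      rcases List.mem_cons.mp hz with h | h
      · omega
      · exact hle z h
    · -- recurse
      have hrec : scanAltB prev (x :: rest) = scanAltB (some x) rest := by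
        simp only [scanAltB]; exact if_neg hbr
      have hx_not_cand : ¬((x :: rest).count x = 1 ∧ prev ≠ some x) := by
        rintro ⟨hc1, hpne⟩
        have hxrest : x ∉ rest := by
          rw [List.count_cons_self] at hc1
          exact List.count_eq_zero.mp (by omega)
        rcases hrest : rest with _ | ⟨y, rs⟩
        · exact hbr ⟨hpne, by simp [hrest]⟩
        · subst hrest
          by_cases hy : y = x
          · exact hxrest (hy ▸ List.mem_cons_self)
          · exact hbr ⟨hpne, by simp [hy]⟩
      have hcnt : ∀ z, z ≠ x → rest.count z = (x :: rest).count z := by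
        intro z hz
        rw [List.count_cons_of_ne (fun h => hz h.symm)]
      rw [hrec]
      rcases ih (some x) hsrest (fun p hp z hz => by
          injection hp with hp; exact hp ▸ hle z hz) with ⟨hr, hno⟩ | ⟨hm, hc, hne, hmax⟩
      · left
        refine ⟨hr, fun z hz ⟨hzc, hzp⟩ => ?_⟩
        by_cases hzx : z = x
        · exact hx_not_cand ⟨hzx ▸ hzc, hzx ▸ hzp⟩
        · have hzr : z ∈ rest := by rcases List.mem_cons.mp hz with h | h; omega; exact h
          exact hno z hzr ⟨(hcnt z hzx).symm ▸ hzc, by intro h; injection h with h; omega⟩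
      · right
        set r := scanAltB (some x) rest with hrdef
        have hrx : r ≠ x := fun h => hne (by rw [h])
        refine ⟨List.mem_cons_of_mem _ hm, (hcnt r hrx) ▸ hc, ?_, ?_⟩
        · -- prev ≠ some r
          intro hpr
          rcases Decidable.not_and_iff_not_or_not.mp hbr with hp | hh
          · rw [Decidable.not_not] at hp
            rw [hp] at hpr; injection hpr with hpr; exact hrx hpr.symm
          · have hrle : r ≤ x := hle r hm
            have hplarge := hprev _ hpr x List.mem_cons_self
            omega
        · intro z hz hzc hzp
          by_cases hzx : z = x
          · exact absurd ⟨hzx ▸ hzc, hzx ▸ hzp⟩ hx_not_cand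
          · have hzr : z ∈ rest := by rcases List.mem_cons.mp hz with h | h; omega; exact h
            exact hmax z hzr ((hcnt z hzx).symm ▸ hzc) (by intro h; injection h with h; omega)

theorem B_uniqSpec (nums : List Int) : UniqSpec nums (largestUniqueNumber_alt nums) := by
  unfold largestUniqueNumber_alt
  set s := PySem.List.sorted nums (fun x => x) true with hs
  have hperm : s.Perm nums := PySem.List.sorted_perm nums (fun x => x) true
  have hsort : s.Pairwise (fun a b => b ≤ a) := PySem.List.sorted_pairwise_rev nums (fun x => x)
  have hcnt : ∀ z, s.count z = nums.count z := fun z => hperm.count_eq z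
  have hmem : ∀ z, z ∈ s ↔ z ∈ nums := fun z => hperm.mem_iff
  rcases scanAltB_spec s none hsort (by simp) with ⟨hr, hno⟩ | ⟨hm, hc, _, hmax⟩
  · left
    rw [hr]
    exact ⟨rfl, fun z hz hzc => hno z ((hmem z).mpr hz) ⟨(hcnt z) ▸ hzc, by simp⟩⟩
  · right
    exact ⟨(hmem _).mp hm, (hcnt _) ▸ hc,
      fun z hz hzc => hmax z ((hmem z).mpr hz) ((hcnt z) ▸ hzc) (by simp)⟩

-- ===== VERDICT (by name: the statement is the Claim_ definition above) =====
theorem largestUniqueNumber_spec : Claim_equal_largestUniqueNumber := by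
  intro nums _
  exact uniqSpec_unique (A_uniqSpec nums) (B_uniqSpec nums)
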